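-- pv_equiv track=rewrite | github.com/nielsend/RoDTIS | RoDTIS.py | abs_list_search
-- ===== SOURCE A (Python) =====
-- def abs_list_search(list1,list2,min_allow,max_allow):
--     #check that lists are not empty
--     if list1==-1 or list2==-1:
--         return False
--     #if both lists are singleton lists, job is easy
--     if len(list1)==1 and len(list2)==1:
--         list1=list1[0];
--         list2=list2[0];
--         return bool(min_allow<=abs(list1-list2)<=max_allow)
--     else: #else, sad day:must iterate through all matches
--         for item1 in list1:
--             for item2 in list2:
--                 if bool(min_allow<=abs(item1-item2)<=max_allow):
--                     list1=item1;
--                     list2=item2;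
--                     return True
--     return False
-- ===== SOURCE B (Python) =====
-- def abs_list_search(list1, list2, min_allow, max_allow):
--     # Alternative algorithm: sort list2 once; for each x in list1 binary-search for a value of list2
--     # in [x+lo, x+max_allow] or [x-max_allow, x-lo], where lo = max(min_allow, 0)
--     # (|d| >= min_allow is equivalent to |d| >= max(min_allow, 0)).
--     ys = sorted(list2)
--     n = len(ys)
--     lo_bound = max(min_allow, 0)
--
--     def has_in(a, b):
--         # leftmost index i with ys[i] >= a (hand-written bisect_left)
--         lo, hi = 0, n
--         while lo < hi:
--             mid = (lo + hi) // 2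
--             if ys[mid] < a:
--                 lo = mid + 1
--             else:
--                 hi = mid
--         return lo < n and ys[lo] <= b
--
--     for x in list1:
--         if has_in(x + lo_bound, x + max_allow) or has_in(x - max_allow, x - lo_bound):
--             return True
--     return False
-- ===== Notes on version B (the rewrite author's own statement) =====
-- stated objective: alternative
-- what changed: Instead of scanning every pair in nested loops, B sorts list2 once and, for each element of list1, binary-searches the two value intervals [x+max(min_allow,0), x+max_allow] and [x-max_allow, x-max(min_allow,0)] for a member of list2.
import Mathlib
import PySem

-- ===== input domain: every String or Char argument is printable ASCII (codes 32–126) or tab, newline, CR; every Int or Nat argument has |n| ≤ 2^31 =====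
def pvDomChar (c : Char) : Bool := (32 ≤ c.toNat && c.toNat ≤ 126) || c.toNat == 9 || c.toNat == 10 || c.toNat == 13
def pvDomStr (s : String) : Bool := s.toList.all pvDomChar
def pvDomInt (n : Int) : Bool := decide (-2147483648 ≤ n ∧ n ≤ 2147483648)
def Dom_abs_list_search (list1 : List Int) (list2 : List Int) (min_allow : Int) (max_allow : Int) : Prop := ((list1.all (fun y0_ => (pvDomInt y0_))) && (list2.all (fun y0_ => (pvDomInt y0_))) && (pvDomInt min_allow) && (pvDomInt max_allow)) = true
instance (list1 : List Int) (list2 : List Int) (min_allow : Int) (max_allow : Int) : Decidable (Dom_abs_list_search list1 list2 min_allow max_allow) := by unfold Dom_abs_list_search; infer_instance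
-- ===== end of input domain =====

-- B replaces A's nested pairwise scan by sorting list2 once and binary-searching two
-- value intervals per element of list1 (objective: alternative algorithm, same result).

-- ===== PORT A =====
-- Python's `list1 == -1 or list2 == -1` compares a list with an int: always False, nothing to port.
def abs_list_search (list1 : List Int) (list2 : List Int) (min_allow : Int) (max_allow : Int) : Bool :=
  if list1.length == 1 && list2.length == 1 then
    -- list1[0] / list2[0]; in-range by the length guard
    let a := list1.headI
    let b := list2.headI
    decide (min_allow ≤ |a - b| ∧ |a - b| ≤ max_allow)
  else
    -- nested for-loops with early `return True`
    list1.any fun item1 =>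
      list2.any fun item2 =>
        decide (min_allow ≤ |item1 - item2| ∧ |item1 - item2| ≤ max_allow)

-- ===== PORT B =====
-- hand-written bisect_left loop of Source B: leftmost index i in [lo, hi) with ys[i] ≥ a (or hi)
def pvBisectGE (ys : List Int) (a : Int) (lo hi : Nat) : Nat :=
  if _h : lo < hi then
    let mid := (lo + hi) / 2
    if ys.getD mid 0 < a then pvBisectGE ys a (mid + 1) hi
    else pvBisectGE ys a lo mid
  else lo
termination_by hi - lo
decreasing_by all_goals omega

-- Source B's has_in: some element of (sorted) ys lies in [a, b]
def pvHasIn (ys : List Int) (a : Int) (b : Int) : Bool :=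
  let i := pvBisectGE ys a 0 ys.length
  decide (i < ys.length) && decide (ys.getD i 0 ≤ b)

def abs_list_search_alt (list1 : List Int) (list2 : List Int) (min_allow : Int) (max_allow : Int) : Bool :=
  let ys := PySem.List.sorted list2 (fun y => y) false
  let loB := max min_allow 0
  list1.any fun x =>
    pvHasIn ys (x + loB) (x + max_allow) || pvHasIn ys (x - max_allow) (x - loB)

-- ===== PRECONDITION & SPEC =====
def Spec_abs_list_search (list1 : List Int) (list2 : List Int) (min_allow : Int) (max_allow : Int) (out : Bool) : Prop := out = abs_list_search_alt list1 list2 min_allow max_allow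
instance (list1 : List Int) (list2 : List Int) (min_allow : Int) (max_allow : Int) (out : Bool) : Decidable (Spec_abs_list_search list1 list2 min_allow max_allow out) := by unfold Spec_abs_list_search; infer_instance

-- ===== CLAIM (what is proved, stated in full; the proofs are below) =====
def Claim_equal_abs_list_search : Prop := ∀ (list1 : List Int) (list2 : List Int) (min_allow : Int) (max_allow : Int), Dom_abs_list_search list1 list2 min_allow max_allow → Spec_abs_list_search list1 list2 min_allow max_allow (abs_list_search list1 list2 min_allow max_allow)

-- ===== LEMMAS AND PROOFS =====

-- sorted lists are index-monotone (through getD)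
theorem getD_mono_of_pairwise (ys : List Int) (hs : ys.Pairwise (· ≤ ·))
    (p q : Nat) (hpq : p ≤ q) (hq : q < ys.length) :
    ys.getD p 0 ≤ ys.getD q 0 := by
  rcases Nat.lt_or_ge p q with h | h
  · rw [List.getD_eq_getElem ys 0 (by omega), List.getD_eq_getElem ys 0 hq]
    exact (List.pairwise_iff_getElem.mp hs) p q (by omega) hq h
  · have : p = q := by omega
    subst this; exact le_refl _

-- binary-search invariant
theorem pvBisectGE_invariant (ys : List Int) (hs : ys.Pairwise (· ≤ ·)) (a : Int) :
    ∀ (lo hi : Nat), lo ≤ hi → hi ≤ ys.length →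
      lo ≤ pvBisectGE ys a lo hi ∧ pvBisectGE ys a lo hi ≤ hi ∧
      (∀ j, lo ≤ j → j < pvBisectGE ys a lo hi → ys.getD j 0 < a) ∧
      (pvBisectGE ys a lo hi < hi → a ≤ ys.getD (pvBisectGE ys a lo hi) 0) := by
  intro lo hi
  induction hlh : hi - lo using Nat.strong_induction_on generalizing lo hi with
  | _ n ih =>
    intro hle hhi
    rw [pvBisectGE]
    by_cases h : lo < hi
    · simp only [h, dite_true]
      set mid := (lo + hi) / 2 with hmid
      have hm1 : lo ≤ mid := by omega
      have hm2 : mid < hi := by omega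
      by_cases hc : ys.getD mid 0 < a
      · simp only [hc, if_true]
        obtain ⟨i1, i2, i3, i4⟩ := ih (hi - (mid + 1)) (by omega) (mid + 1) hi rfl (by omega) hhi
        refine ⟨by omega, i2, ?_, i4⟩
        intro j hj1 hj2
        rcases Nat.lt_or_ge j (mid + 1) with hj | hj
        · calc ys.getD j 0 ≤ ys.getD mid 0 :=
                getD_mono_of_pairwise ys hs j mid (by omega) (by omega)
            _ < a := hc
        · exact i3 j hj hj2
      · simp only [hc, if_false]
        obtain ⟨i1, i2, i3, i4⟩ := ih (mid - lo) (by omega) lo mid rfl hm1 (by omega)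
        refine ⟨i1, by omega, i3, ?_⟩
        intro _hlt
        rcases Nat.lt_or_ge (pvBisectGE ys a lo mid) mid with hx | hx
        · exact i4 hx
        · have : pvBisectGE ys a lo mid = mid := by omega
          rw [this]; omega
    · simp only [h, dite_false]
      exact ⟨le_refl _, by omega, fun j h1 h2 => absurd h2 (by omega), fun hlt => hlt.elim⟩

-- has_in is exactly "some element of ys lies in [a, b]" (ys sorted)
theorem pvHasIn_iff (ys : List Int) (hs : ys.Pairwise (· ≤ ·)) (a b : Int) :
    pvHasIn ys a b = true ↔ ∃ y ∈ ys, a ≤ y ∧ y ≤ b := by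
  obtain ⟨i1, i2, i3, i4⟩ :=
    pvBisectGE_invariant ys hs a 0 ys.length (Nat.zero_le _) (le_refl _)
  set i := pvBisectGE ys a 0 ys.length with hi
  unfold pvHasIn
  rw [← hi]
  simp only [Bool.and_eq_true, decide_eq_true_eq]
  constructor
  · rintro ⟨hlt, hle⟩
    refine ⟨ys.getD i 0, ?_, i4 hlt, hle⟩
    rw [List.getD_eq_getElem ys 0 hlt]
    exact List.getElem_mem _
  · rintro ⟨y, hy, hay, hyb⟩
    obtain ⟨j, hj, hyj⟩ := List.mem_iff_getElem.mp hy
    have hgj : ys.getD j 0 = y := by rw [List.getD_eq_getElem ys 0 hj, hyj]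
    have hij : i ≤ j := by
      by_contra hcon
      have := i3 j (Nat.zero_le _) (by omega)
      omega
    refine ⟨by omega, ?_⟩
    calc ys.getD i 0 ≤ ys.getD j 0 := getD_mono_of_pairwise ys hs i j hij hj
      _ = y := hgj
      _ ≤ b := hyb

-- the interval decomposition of the abs-difference test
theorem abs_interval (x y mn mx : Int) :
    (mn ≤ |x - y| ∧ |x - y| ≤ mx) ↔
      ((x + max mn 0 ≤ y ∧ y ≤ x + mx) ∨ (x - mx ≤ y ∧ y ≤ x - max mn 0)) := by
  rw [Int.abs_eq_natAbs, Int.max_def]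
  split_ifs <;> omega

-- B computes the existential over all pairs
theorem alt_iff (list1 list2 : List Int) (mn mx : Int) :
    abs_list_search_alt list1 list2 mn mx = true ↔
      ∃ x ∈ list1, ∃ y ∈ list2, mn ≤ |x - y| ∧ |x - y| ≤ mx := by
  unfold abs_list_search_alt
  have hs : (PySem.List.sorted list2 (fun y => y) false).Pairwise (· ≤ ·) :=
    PySem.List.sorted_pairwise list2 (fun y => y)
  simp only [List.any_eq_true, Bool.or_eq_true,
    pvHasIn_iff _ hs, PySem.List.mem_sorted]
  constructor
  · rintro ⟨x, hx, ⟨y, hy, h1, h2⟩ | ⟨y, hy, h1, h2⟩⟩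
    · exact ⟨x, hx, y, hy, (abs_interval x y mn mx).mpr (Or.inl ⟨h1, h2⟩)⟩
    · exact ⟨x, hx, y, hy, (abs_interval x y mn mx).mpr (Or.inr ⟨h1, h2⟩)⟩
  · rintro ⟨x, hx, y, hy, hp⟩
    rcases (abs_interval x y mn mx).mp hp with h | h
    · exact ⟨x, hx, Or.inl ⟨y, hy, h⟩⟩
    · exact ⟨x, hx, Or.inr ⟨y, hy, h⟩⟩

-- A computes the same existential (the singleton branch is the same test on the only pair)
theorem a_iff (list1 list2 : List Int) (mn mx : Int) :
    abs_list_search list1 list2 mn mx = true ↔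
      ∃ x ∈ list1, ∃ y ∈ list2, mn ≤ |x - y| ∧ |x - y| ≤ mx := by
  unfold abs_list_search
  by_cases h : list1.length == 1 && list2.length == 1
  · simp only [h, if_true]
    have h1 : list1.length = 1 := by
      have := h; simp only [Bool.and_eq_true, beq_iff_eq] at this; exact this.1
    have h2 : list2.length = 1 := by
      have := h; simp only [Bool.and_eq_true, beq_iff_eq] at this; exact this.2
    obtain ⟨a, rfl⟩ := List.length_eq_one_iff.mp h1
    obtain ⟨b, rfl⟩ := List.length_eq_one_iff.mp h2
    simp
  · simp only [h]
    simp [List.any_eq_true]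

-- ===== VERDICT (by name: the statement is the Claim_ definition above) =====
theorem abs_list_search_spec : Claim_equal_abs_list_search := by
  intro list1 list2 mn mx _hdom
  unfold Spec_abs_list_search
  rw [Bool.eq_iff_iff, a_iff, alt_iff]
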